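-- pv_equiv track=rewrite | github.com/universekylin/pba | backend/routes/divisions.py | _ensure_exact_rounds
-- ===== SOURCE A (Python) =====
-- from typing import List, Tuple, Optional
--
-- def _ensure_exact_rounds(
--     base_rounds: List[List[Tuple[Optional[int], Optional[int]]]], target: int = 11
-- ) -> List[List[Tuple[Optional[int], Optional[int]]]]:
--     if not base_rounds and target > 0:
--         return [[] for _ in range(target)]
--     out = list(base_rounds)
--     i = 0
--     while len(out) < target and base_rounds:
--         mirrored = [(b, a) for (a, b) in base_rounds[i]]
--         out.append(mirrored)
--         i = (i + 1) % len(base_rounds)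
--     return out[:target]
-- ===== SOURCE B (Python) =====
-- from typing import List, Tuple, Optional
--
-- def _ensure_exact_rounds(
--     base_rounds: List[List[Tuple[Optional[int], Optional[int]]]], target: int = 11
-- ) -> List[List[Tuple[Optional[int], Optional[int]]]]:
--     if not base_rounds:
--         return [[] for _ in range(target)]
--     n = len(base_rounds)
--     needed = max(0, target - n)
--     mirrored = [[(b, a) for (a, b) in r] for r in base_rounds]
--     ext = (mirrored * (needed // n + 1))[:needed]
--     return (list(base_rounds) + ext)[:target]
-- ===== Notes on version B (the rewrite author's own statement) =====
-- stated objective: faster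
-- what changed: Replaces A's incremental while-append loop with a modular cursor by computing the mirrored block once and extending via block replication (list multiplication) plus a single slice.
import Mathlib
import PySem

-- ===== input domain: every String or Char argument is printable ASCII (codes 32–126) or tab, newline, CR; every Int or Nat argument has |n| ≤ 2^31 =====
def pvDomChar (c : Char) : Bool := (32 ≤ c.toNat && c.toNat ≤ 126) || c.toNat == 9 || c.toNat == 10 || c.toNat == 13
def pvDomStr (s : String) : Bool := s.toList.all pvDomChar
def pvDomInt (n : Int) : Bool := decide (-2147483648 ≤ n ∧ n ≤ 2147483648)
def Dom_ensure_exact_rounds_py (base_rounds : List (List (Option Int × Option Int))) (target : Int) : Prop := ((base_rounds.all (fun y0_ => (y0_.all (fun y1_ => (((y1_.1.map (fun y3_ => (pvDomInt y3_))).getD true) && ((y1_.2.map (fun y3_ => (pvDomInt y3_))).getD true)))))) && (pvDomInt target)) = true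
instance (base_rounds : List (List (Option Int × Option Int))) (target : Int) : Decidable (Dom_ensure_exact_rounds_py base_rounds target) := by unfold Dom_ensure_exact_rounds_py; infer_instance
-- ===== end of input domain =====

-- B replaces A's incremental while-append-with-modular-index loop by building the
-- mirrored block once and tiling/slicing it (objective: alternative decomposition).

-- ===== PORT A =====
-- mirrored = [(b, a) for (a, b) in r]  (the same comprehension appears in both Pythons)
def pvMirror (r : List (Option Int × Option Int)) : List (Option Int × Option Int) :=
  r.map (fun p => (p.2, p.1))

-- the while loop: while len(out) < target and base_rounds: out.append(mirror(base_rounds[i])); i = (i+1) % len(base_rounds)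
def pvALoop (base : List (List (Option Int × Option Int))) (target : Int)
    (out : List (List (Option Int × Option Int))) (i : Nat) :
    List (List (Option Int × Option Int)) :=
  if h : (out.length : Int) < target ∧ base ≠ [] then
    pvALoop base target (out ++ [pvMirror (base.getD i [])]) ((i + 1) % base.length)
  else out
termination_by (target - out.length).toNat
decreasing_by simp only [List.length_append, List.length_cons, List.length_nil]; omega

def ensure_exact_rounds_py (base_rounds : List (List (Option Int × Option Int))) (target : Int) :
    List (List (Option Int × Option Int)) :=
  if base_rounds = [] ∧ 0 < target then
    List.replicate target.toNat []          -- [[] for _ in range(target)]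
  else
    PySem.List.slice (pvALoop base_rounds target base_rounds 0) none (some target)  -- out[:target]

-- ===== PORT B =====
def ensure_exact_rounds_py_alt (base_rounds : List (List (Option Int × Option Int))) (target : Int) :
    List (List (Option Int × Option Int)) :=
  if base_rounds = [] then
    List.replicate target.toNat []          -- [[] for _ in range(target)]
  else
    let n : Int := base_rounds.length
    let needed : Int := max 0 (target - n)
    let mirrored := base_rounds.map pvMirror
    let ext := PySem.List.slice (PySem.List.pyRepeat mirrored (PySem.Int.floordiv needed n + 1))
                 none (some needed)         -- (mirrored * (needed//n + 1))[:needed]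
    PySem.List.slice (base_rounds ++ ext) none (some target)

-- ===== PRECONDITION & SPEC =====
def Spec_ensure_exact_rounds_py (base_rounds : List (List (Option Int × Option Int))) (target : Int) (out : List (List (Option Int × Option Int))) : Prop := out = ensure_exact_rounds_py_alt base_rounds target
instance (base_rounds : List (List (Option Int × Option Int))) (target : Int) (out : List (List (Option Int × Option Int))) : Decidable (Spec_ensure_exact_rounds_py base_rounds target out) := by unfold Spec_ensure_exact_rounds_py; infer_instance

-- ===== CLAIM (what is proved, stated in full; the proofs are below) =====
def Claim_equal_ensure_exact_rounds_py : Prop := ∀ (base_rounds : List (List (Option Int × Option Int))) (target : Int), Dom_ensure_exact_rounds_py base_rounds target → Spec_ensure_exact_rounds_py base_rounds target (ensure_exact_rounds_py base_rounds target)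

-- ===== LEMMAS AND PROOFS =====

-- take M of a prefix of range/map form: the first M entries of l, indexed directly
lemma take_eq_range_map {α : Type} (l : List α) (d : α) (M : Nat) (hM : M ≤ l.length) :
    l.take M = (List.range M).map (fun j => l.getD j d) := by
  apply List.ext_getElem
  · simp [Nat.min_eq_left hM]
  · intro j h1 h2
    simp only [List.length_take] at h1
    have hj : j < l.length := lt_of_lt_of_le (lt_min_iff.mp h1).1 (le_refl _) |>.trans_le hM
    simp [List.getD_eq_getElem?_getD, List.getElem?_eq_getElem hj]

-- the tiling: the first M elements of l repeated K times are l[j % len(l)]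
lemma take_flatten_replicate {α : Type} (l : List α) (d : α) (K M : Nat)
    (hM : M ≤ K * l.length) :
    (List.replicate K l).flatten.take M
      = (List.range M).map (fun j => l.getD (j % l.length) d) := by
  induction K generalizing M with
  | zero =>
      simp at hM
      simp [hM]
  | succ K ih =>
      rw [List.replicate_succ, List.flatten_cons, List.take_append]
      by_cases hMn : M ≤ l.length
      · have h0 : M - l.length = 0 := by omega
        rw [h0, List.take_zero, List.append_nil, take_eq_range_map l d M hMn]
        apply List.map_congr_left
        intro j hj
        have : j < l.length := lt_of_lt_of_le (List.mem_range.mp hj) hMn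
        rw [Nat.mod_eq_of_lt this]
      · have hn : l.length ≤ M := by omega
        have hM' : M - l.length ≤ K * l.length := by
          rw [Nat.succ_mul] at hM; omega
        rw [ih (M - l.length) hM', List.take_of_length_le hn]
        have hsplit : List.range M
            = List.range l.length ++ (List.range (M - l.length)).map (fun x => l.length + x) := by
          rw [← List.range_add, Nat.add_sub_cancel' hn]
        rw [hsplit, List.map_append, List.map_map]
        congr 1
        · conv_lhs => rw [← List.take_length (l := l)]
          rw [take_eq_range_map l d l.length (le_refl _)]
          apply List.map_congr_left
          intro j hj
          rw [Nat.mod_eq_of_lt (List.mem_range.mp hj)]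
        · apply List.map_congr_left
          intro j _
          simp [Function.comp, Nat.add_mod_left]

-- characterization of A's while loop
lemma pvALoop_eq (base : List (List (Option Int × Option Int))) (hb : base ≠ []) (target : Int) :
    ∀ (m : Nat) (out : List (List (Option Int × Option Int))) (i : Nat),
      i < base.length → m = (target - out.length).toNat →
      pvALoop base target out i
        = out ++ (List.range m).map
            (fun j => pvMirror (base.getD ((i + j) % base.length) [])) := by
  intro m
  induction m with
  | zero =>
      intro out i _ hm
      rw [pvALoop]
      rw [dif_neg]
      · simp
      · rintro ⟨hlt, -⟩; omega
  | succ m ih =>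
      intro out i hi hm
      have hpos : 0 < base.length := List.length_pos_iff.mpr hb
      rw [pvALoop, dif_pos ⟨by omega, hb⟩]
      rw [ih (out ++ [pvMirror (base.getD i [])]) ((i + 1) % base.length)
            (Nat.mod_lt _ hpos) (by simp; omega)]
      rw [List.append_assoc]
      congr 1
      rw [List.range_succ_eq_map, List.map_cons, List.map_map]
      simp only [List.singleton_append]
      congr 1
      · rw [Nat.add_zero, Nat.mod_eq_of_lt hi]
      · apply List.map_congr_left
        intro j _
        simp only [Function.comp, Nat.succ_eq_add_one]
        have hmod : ((i + 1) % base.length + j) % base.length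
            = (i + (j + 1)) % base.length := by
          rw [Nat.mod_add_mod]; congr 1; omega
        rw [hmod]

-- mirrored rows, indexed
lemma getD_map_mirror (base : List (List (Option Int × Option Int))) (k : Nat)
    (hk : k < base.length) :
    (base.map pvMirror).getD k [] = pvMirror (base.getD k []) := by
  rw [List.getD_eq_getElem?_getD, List.getD_eq_getElem?_getD,
      List.getElem?_eq_getElem (by simpa using hk), List.getElem?_eq_getElem hk]
  simp

-- ===== VERDICT (by name: the statement is the Claim_ definition above) =====
theorem ensure_exact_rounds_py_spec : Claim_equal_ensure_exact_rounds_py := by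
  intro base target _
  unfold Spec_ensure_exact_rounds_py ensure_exact_rounds_py ensure_exact_rounds_py_alt
  by_cases hb : base = []
  · subst hb
    by_cases ht : 0 < target
    · simp [ht]
    · have : target.toNat = 0 := by omega
      rw [if_neg (by simp [ht]), if_pos rfl, this, List.replicate_zero]
      rw [pvALoop]
      simp [PySem.List.slice, PySem.List.clampIdx]
  · have hpos : 0 < base.length := List.length_pos_iff.mpr hb
    rw [if_neg (by simp [hb]), if_neg hb]
    show PySem.List.slice (pvALoop base target base 0) none (some target)
       = PySem.List.slice (base ++ PySem.List.slice
           (PySem.List.pyRepeat (base.map pvMirror)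
             (PySem.Int.floordiv (max 0 (target - (base.length : Int))) (base.length : Int) + 1))
           none (some (max 0 (target - (base.length : Int))))) none (some target)
    set n : Int := (base.length : Int) with hn
    set needed : Int := max 0 (target - n) with hneed
    have hneed0 : 0 ≤ needed := le_max_left _ _
    set M : Nat := needed.toNat with hM
    -- A's side
    have hA : pvALoop base target base 0
        = base ++ (List.range M).map (fun j => pvMirror (base.getD (j % base.length) [])) := by
      rw [pvALoop_eq base hb target M base 0 hpos (by simp [hM, hneed, hn]; omega)]
      simp
    -- B's side: the extension equals the same range/map
    have hdiv : PySem.Int.floordiv needed n = needed / n := by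
      exact PySem.Int.floordiv_eq_ediv_of_pos (by simp [hn]; omega)
    have hrep : PySem.List.pyRepeat (base.map pvMirror) (PySem.Int.floordiv needed n + 1)
        = (List.replicate (PySem.Int.floordiv needed n + 1).toNat (base.map pvMirror)).flatten := by
      simp [PySem.List.pyRepeat]
    have hKM : M ≤ (PySem.Int.floordiv needed n + 1).toNat * (base.map pvMirror).length := by
      rw [hdiv, List.length_map]
      have hnpos : (0:Int) < n := by simp [hn]; omega
      have h1 : n * (needed / n) + needed % n = needed := (Int.mul_ediv_add_emod needed n)
      have h2 : needed % n < n := Int.emod_lt_of_pos needed hnpos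
      have hq0 : 0 ≤ needed / n := Int.ediv_nonneg hneed0 (le_of_lt hnpos)
      have hle : needed ≤ (needed / n + 1) * n := by nlinarith
      have htn : (((needed / n + 1).toNat : Int)) = needed / n + 1 :=
        Int.toNat_of_nonneg (by omega)
      have hfin : (M : Int) = needed := by simp [hM, Int.toNat_of_nonneg hneed0]
      have hcast : (((needed / n + 1).toNat * base.length : Nat) : Int) = (needed / n + 1) * n := by
        push_cast
        rw [htn, ← hn]
      have hint : (M : Int) ≤ (((needed / n + 1).toNat * base.length : Nat) : Int) := by
        rw [hcast, hfin]; exact hle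
      exact_mod_cast hint
    have hB : PySem.List.slice (PySem.List.pyRepeat (base.map pvMirror)
                (PySem.Int.floordiv needed n + 1)) none (some needed)
        = (List.range M).map (fun j => pvMirror (base.getD (j % base.length) [])) := by
      rw [PySem.List.slice_to _ hneed0, hrep,
          take_flatten_replicate (base.map pvMirror) [] _ M hKM]
      apply List.map_congr_left
      intro j _
      rw [List.length_map]
      exact getD_map_mirror base (j % base.length) (Nat.mod_lt j hpos)
    rw [hA, hB]
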